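-- pv_equiv track=rewrite | github.com/anthonywritescode/aoc2019 | day06/part1.py | compute_memoized
-- ===== SOURCE A (Python) =====
-- import functools
--
-- def compute_memoized(s: str) -> int:
--     nodes = {'COM': ''}
--     for line in s.splitlines():
--         parent, name = line.split(')')
--         nodes[name] = parent
--
--     @functools.lru_cache(maxsize=None)
--     def size(node: str) -> int:
--         if node == '':
--             return 0
--         else:
--             return 1 + size(nodes[node])
--
--     total = 0
--     for node in nodes.values():
--         total += size(node)
--     return total
-- ===== SOURCE B (Python) =====
-- def compute_memoized(s: str) -> int:
--     children = {}
--     for line in s.splitlines():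
--         parent, name = line.split(')')
--         children.setdefault(parent, []).append(name)
--     total = 0
--     depth = 0
--     level = ['COM']
--     while level:
--         total += depth * len(level)
--         level = [c for node in level for c in children.get(node, [])]
--         depth += 1
--     return total
-- ===== Notes on version B (the rewrite author's own statement) =====
-- stated objective: alternative
-- what changed: B parses the edges into a parent->children adjacency dict and walks the tree top-down from 'COM' level by level, accumulating depth*len(level), instead of A's name->parent dict with a memoized leaf-to-root recursion summed per node.
-- outside the precondition, e.g. on compute_memoized('COM)A\nCOM)A'): A returns 1, B returns 2; on compute_memoized('COM)\n)X'): A returns 1, B returns 3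
import Mathlib
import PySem

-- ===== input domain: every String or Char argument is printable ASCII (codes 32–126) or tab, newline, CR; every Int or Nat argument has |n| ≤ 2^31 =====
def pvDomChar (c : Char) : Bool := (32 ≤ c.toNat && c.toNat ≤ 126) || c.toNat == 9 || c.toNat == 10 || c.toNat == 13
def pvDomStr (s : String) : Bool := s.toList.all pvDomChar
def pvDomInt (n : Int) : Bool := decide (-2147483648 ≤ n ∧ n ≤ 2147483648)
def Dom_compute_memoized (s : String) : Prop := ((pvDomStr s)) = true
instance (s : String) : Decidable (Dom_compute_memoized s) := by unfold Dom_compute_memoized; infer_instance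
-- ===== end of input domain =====

-- B re-implements the orbit count top-down: a parent → children adjacency dict and a
-- level-by-level walk from 'COM' accumulating depth·(level size), instead of A's
-- name → parent dict with a memoized leaf-to-root recursion (alternative algorithm, same cost).

-- Shared parsing helper: both Pythons run «parent, name = line.split(')')» on every line;
-- `none` = the ValueError both raise on a line without exactly one ')' (excluded by Pre_).
def pvParse : List String → Option (List (String × String))
  | [] => some []
  | line :: rest =>
    match PySem.Str.split? line ")" with
    | some [p, n] => (pvParse rest).map (fun es => (p, n) :: es)
    | _ => none

-- ===== PORT A =====
-- `size` of A, without the functools.lru_cache decorator (pure memoization: it never changes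
-- the returned value), with fuel: under Pre_ every parent chain reaches '' within the fuel;
-- the 0 results for exhausted fuel / missing key sit exactly where Python raises
-- RecursionError / KeyError (excluded by Pre_).
def pvSizeA (nodes : PySem.Dict String String) : Nat → String → Int
  | 0, _ => 0
  | f + 1, node =>
    if node = "" then 0
    else
      match nodes.get? node with
      | some p => 1 + pvSizeA nodes f p
      | none => 0

def compute_memoized (s : String) : Int :=
  match pvParse (PySem.Str.splitlines s) with
  | none => 0
  | some es =>
    let nodes : PySem.Dict String String :=
      es.foldl (fun d e => d.insert e.2 e.1) (PySem.Dict.ofList [("COM", "")])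
    nodes.values.foldl (fun total v => total + pvSizeA nodes (nodes.size + 1) v) 0

-- ===== PORT B =====
-- the while-loop of Source B, with fuel: under Pre_ the levels are disjoint nonempty subsets of
-- the node set, so the loop stops within es.length + 2 iterations.
def pvBfs (children : PySem.Dict String (List String)) : Nat → List String → Int → Int → Int
  | 0, _, total, _ => total
  | f + 1, level, total, depth =>
    if level.isEmpty then total
    else
      pvBfs children f (level.flatMap (fun n => children.getD n []))
        (total + depth * (level.length : Int)) (depth + 1)

def compute_memoized_alt (s : String) : Int :=
  match pvParse (PySem.Str.splitlines s) with
  | none => 0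
  | some es =>
    -- children.setdefault(parent, []).append(name) = d[parent] = d.get(parent, []) + [name]
    let children : PySem.Dict String (List String) :=
      es.foldl (fun d e => d.modify e.1 [] (fun l => l ++ [e.2])) PySem.Dict.empty
    pvBfs children (es.length + 2) ["COM"] 0 0

-- ===== PRECONDITION & SPEC =====
def pvLookP (es : List (String × String)) (x : String) : Option String :=
  (es.find? (fun e => e.2 == x)).map (fun e => e.1)

-- does x's parent chain reach 'COM' within the given number of steps?
def pvAOk (es : List (String × String)) : Nat → String → Bool
  | 0, x => x == "COM"
  | f + 1, x =>
    x == "COM" ||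
      match pvLookP es x with
      | some p => pvAOk es f p
      | none => false

-- Pre_: every line has exactly one ')' and EITHER the edges form an orbit tree rooted at
-- 'COM' (child names distinct, never 'COM', parents are known non-empty nodes, every chain
-- reaches 'COM') OR every parent field is empty (degenerate maps, on which both return 0).
-- Beyond A's crashes (ValueError / KeyError / RecursionError) it also excludes malformed
-- maps on which A still returns: duplicate child names (A's last-wins dict overwrite
-- silently drops orbits) and maps using the empty name as a parent, which collides with
-- A's internal '' recursion sentinel.
-- closed-form view of the input for Pre_: line shapes and the edge of each line
def pvSplitsOk (s : String) : Bool :=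
  (PySem.Str.splitlines s).all
    (fun line => ((PySem.Str.split? line ")").getD []).length == 2)

def pvEdges (s : String) : List (String × String) :=
  (PySem.Str.splitlines s).map (fun line =>
    match (PySem.Str.split? line ")").getD [] with
    | p :: n :: _ => (p, n)
    | _ => ("", ""))

def pvPreB (s : String) : Bool :=
  pvSplitsOk s &&
    (let es := pvEdges s
     let names := es.map (fun e => e.2)
     (decide names.Nodup && !(names.contains "COM") &&
         es.all (fun e => e.1 != "" && (e.1 == "COM" || names.contains e.1)) &&
         names.all (fun n => pvAOk es (es.length + 1) n)) ||
       es.all (fun e => e.1 == ""))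

def Pre_compute_memoized (s : String) : Prop := pvPreB s = true
instance (s : String) : Decidable (Pre_compute_memoized s) := by
  unfold Pre_compute_memoized; infer_instance

def pvWitness_compute_memoized : String := "COM)B\nB)C\nCOM)D\nC)E"

def Spec_compute_memoized (s : String) (out : Int) : Prop := out = compute_memoized_alt s
instance (s : String) (out : Int) : Decidable (Spec_compute_memoized s out) := by
  unfold Spec_compute_memoized; infer_instance

-- ===== CLAIM (what is proved, stated in full; the proofs are below) =====
def Claim_equal_compute_memoized : Prop :=
  ∀ (s : String), Dom_compute_memoized s → Pre_compute_memoized s →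
    Spec_compute_memoized s (compute_memoized s)

-- ===== LEMMAS AND PROOFS =====

-- depth of x: length of the parent chain from x up to 'COM' (with fuel)
def pvDp (es : List (String × String)) : Nat → String → Nat
  | 0, _ => 0
  | f + 1, x =>
    if x = "COM" then 0
    else
      match pvLookP es x with
      | some p => pvDp es f p + 1
      | none => 0

def pvDD (es : List (String × String)) (x : String) : Nat := pvDp es (es.length + 1) x

def pvAllN (es : List (String × String)) : List String := "COM" :: es.map (fun e => e.2)

def pvChildL (es : List (String × String)) (n : String) : List String :=
  (es.filter (fun e => e.1 == n)).map (fun e => e.2)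

def pvLv (es : List (String × String)) (k : Nat) : List String :=
  (pvAllN es).filter (fun c => pvDD es c == k)

def pvNodes (es : List (String × String)) : PySem.Dict String String :=
  es.foldl (fun d e => d.insert e.2 e.1) (PySem.Dict.ofList [("COM", "")])

def pvChildren (es : List (String × String)) : PySem.Dict String (List String) :=
  es.foldl (fun d e => d.modify e.1 [] (fun l => l ++ [e.2])) PySem.Dict.empty

-- the well-formedness Pre_ guarantees for the parsed edge list
def pvGood (es : List (String × String)) : Prop :=
  (es.map (fun e => e.2)).Nodup ∧
  "COM" ∉ es.map (fun e => e.2) ∧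
  (∀ e ∈ es, e.1 ≠ "" ∧ (e.1 = "COM" ∨ e.1 ∈ es.map (fun e => e.2))) ∧
  (∀ n ∈ es.map (fun e => e.2), pvAOk es (es.length + 1) n = true)

-- the degenerate alternative: every parent field is the empty string
def pvZero (es : List (String × String)) : Prop := ∀ e ∈ es, e.1 = ""

theorem lookP_eq_none {es : List (String × String)} {x : String}
    (hx : x ∉ es.map (fun e => e.2)) : pvLookP es x = none := by
  unfold pvLookP
  rw [List.find?_eq_none.mpr]
  · rfl
  · intro e he hbe
    exact hx (List.mem_map.mpr ⟨e, he, by simpa using hbe⟩)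

theorem lookP_of_mem {es : List (String × String)} (hnd : (es.map (fun e => e.2)).Nodup)
    {e : String × String} (he : e ∈ es) : pvLookP es e.2 = some e.1 := by
  induction es with
  | nil => cases he
  | cons a es ih =>
    simp only [List.map_cons, List.nodup_cons] at hnd
    rcases List.mem_cons.mp he with rfl | hmem
    · simp [pvLookP]
    · have hne : a.2 ≠ e.2 := by
        intro hcontra
        exact hnd.1 (hcontra ▸ List.mem_map.mpr ⟨e, hmem, rfl⟩)
      unfold pvLookP
      rw [List.find?_cons_of_neg (by simpa using hne)]
      exact ih hnd.2 hmem

theorem lookP_mem {es : List (String × String)} {x p : String}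
    (h : pvLookP es x = some p) : ∃ e ∈ es, e.2 = x ∧ e.1 = p := by
  unfold pvLookP at h
  rcases Option.map_eq_some_iff.mp h with ⟨e, hfind, hp⟩
  exact ⟨e, List.mem_of_find?_eq_some hfind, by simpa using List.find?_some hfind, hp⟩

theorem dp_com (es : List (String × String)) : ∀ g, pvDp es g "COM" = 0 := by
  intro g; cases g <;> simp [pvDp]

theorem aok_com (es : List (String × String)) : ∀ g, pvAOk es g "COM" = true := by
  intro g; cases g <;> simp [pvAOk]

theorem dp_le (es : List (String × String)) : ∀ f x, pvDp es f x ≤ f := by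
  intro f
  induction f with
  | zero => intro x; simp [pvDp]
  | succ f ih =>
    intro x
    by_cases hx : x = "COM"
    · simp [pvDp, hx]
    · rcases h : pvLookP es x with _ | p
      · simp [pvDp, h]
      · simp only [pvDp, if_neg hx, h]
        have := ih p; omega

theorem dp_stable {es : List (String × String)} :
    ∀ f x, pvAOk es f x = true → ∀ g, f ≤ g → pvDp es g x = pvDp es f x := by
  intro f
  induction f with
  | zero =>
    intro x hok g _
    simp only [pvAOk, beq_iff_eq] at hok
    subst hok
    simp [dp_com, pvDp]
  | succ f ih =>
    intro x hok g hg
    by_cases hx : x = "COM"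
    · subst hx; simp [dp_com]
    · simp only [pvAOk, Bool.or_eq_true, beq_iff_eq] at hok
      rcases hok with hok | hok; · exact absurd hok hx
      obtain ⟨g', rfl⟩ : ∃ g', g = g' + 1 := ⟨g - 1, by omega⟩
      rcases hl : pvLookP es x with _ | p
      · rw [hl] at hok; simp at hok
      · rw [hl] at hok
        simp only [pvDp, if_neg hx, hl]
        rw [ih p hok g' (by omega)]

theorem get?_d0 (x : String) :
    (PySem.Dict.ofList [("COM", "")] : PySem.Dict String String).get? x =
      if x = "COM" then some "" else none := by
  rw [show (PySem.Dict.ofList [("COM", "")] : PySem.Dict String String) =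
        PySem.Dict.mk [("COM", "")] from rfl]
  rw [PySem.Dict.get?_mk_cons]
  rcases eq_or_ne x "COM" with rfl | h
  · simp
  · simp [h, Ne.symm h, PySem.Dict.get?]

theorem contains_d0 (x : String) (h : x ≠ "COM") :
    (PySem.Dict.ofList [("COM", "")] : PySem.Dict String String).contains x = false := by
  rw [PySem.Dict.contains_eq_isSome_get?, get?_d0, if_neg h]
  rfl

theorem get?_nodes_aux {es : List (String × String)} (hnd : (es.map (fun e => e.2)).Nodup)
    (d : PySem.Dict String String) (x : String) :
    (es.foldl (fun d e => d.insert e.2 e.1) d).get? x =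
      match pvLookP es x with
      | some p => some p
      | none => d.get? x := by
  induction es generalizing d with
  | nil => simp [pvLookP]
  | cons e es ih =>
    simp only [List.map_cons, List.nodup_cons] at hnd
    rw [List.foldl_cons, ih hnd.2]
    rcases eq_or_ne e.2 x with rfl | hne
    · rw [lookP_eq_none hnd.1]
      have : pvLookP (e :: es) e.2 = some e.1 := by simp [pvLookP]
      rw [this, PySem.Dict.get?_insert_self]
    · have : pvLookP (e :: es) x = pvLookP es x := by
        unfold pvLookP
        rw [List.find?_cons_of_neg (by simpa using hne)]
      rw [this]
      rcases h : pvLookP es x with _ | p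
      · simp only [PySem.Dict.get?_insert_of_ne d e.1 (Ne.symm hne)]
      · rfl

theorem get?_nodes {es : List (String × String)} (hnd : (es.map (fun e => e.2)).Nodup)
    (x : String) :
    (pvNodes es).get? x =
      match pvLookP es x with
      | some p => some p
      | none => if x = "COM" then some "" else none := by
  unfold pvNodes
  rw [get?_nodes_aux hnd, get?_d0]

theorem items_foldl_fresh :
    ∀ (es : List (String × String)) (d : PySem.Dict String String),
      (es.map (fun e => e.2)).Nodup → (∀ e ∈ es, d.contains e.2 = false) →
      (es.foldl (fun d e => d.insert e.2 e.1) d).items =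
        d.items ++ es.map (fun e => (e.2, e.1)) := by
  intro es
  induction es with
  | nil => intro d _ _; simp
  | cons e es ih =>
    intro d hnd hfresh
    simp only [List.map_cons, List.nodup_cons] at hnd
    rw [List.foldl_cons, ih (d.insert e.2 e.1) hnd.2]
    · rw [PySem.Dict.items_insert_of_not_contains d e.1 (hfresh e (List.mem_cons_self))]
      simp
    · intro e' he'
      rw [PySem.Dict.contains_insert]
      have h1 : (e'.2 == e.2) = false := by
        simp only [beq_eq_false_iff_ne, ne_eq]
        intro hc
        exact hnd.1 (hc ▸ List.mem_map.mpr ⟨e', he', rfl⟩)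
      rw [h1, hfresh e' (List.mem_cons_of_mem _ he')]
      rfl

theorem items_nodes {es : List (String × String)} (hnd : (es.map (fun e => e.2)).Nodup)
    (hcom : "COM" ∉ es.map (fun e => e.2)) :
    (pvNodes es).items = ("COM", "") :: es.map (fun e => (e.2, e.1)) := by
  unfold pvNodes
  rw [items_foldl_fresh es _ hnd]
  · rfl
  · intro e he
    exact contains_d0 e.2 (fun hc => hcom (hc ▸ List.mem_map.mpr ⟨e, he, rfl⟩))

theorem sz_zero (es : List (String × String)) : ∀ g, pvSizeA (pvNodes es) g "" = 0 := by
  intro g; cases g <;> simp [pvSizeA]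

theorem sz_com {es : List (String × String)} (hnd : (es.map (fun e => e.2)).Nodup)
    (hcom : "COM" ∉ es.map (fun e => e.2)) :
    ∀ g, 1 ≤ g → pvSizeA (pvNodes es) g "COM" = 1 := by
  intro g hg
  obtain ⟨g', rfl⟩ : ∃ g', g = g' + 1 := ⟨g - 1, by omega⟩
  show (if "COM" = "" then 0 else _) = 1
  rw [if_neg (by decide), get?_nodes hnd, lookP_eq_none hcom]
  simp [sz_zero]

theorem sz_eq {es : List (String × String)} (hg : pvGood es) :
    ∀ f x, x ≠ "" → pvAOk es f x = true → ∀ g, f + 1 ≤ g →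
      pvSizeA (pvNodes es) g x = (pvDp es f x : Int) + 1 := by
  obtain ⟨hnd, hcom, hpar, _⟩ := hg
  intro f
  induction f with
  | zero =>
    intro x hx0 hok g hfg
    simp only [pvAOk, beq_iff_eq] at hok
    subst hok
    rw [sz_com hnd hcom g (by omega), dp_com]
    rfl
  | succ f ih =>
    intro x hx0 hok g hfg
    by_cases hx : x = "COM"
    · subst hx
      rw [sz_com hnd hcom g (by omega), dp_com]
      rfl
    · simp only [pvAOk, Bool.or_eq_true, beq_iff_eq] at hok
      rcases hok with hok | hok; · exact absurd hok hx
      rcases hl : pvLookP es x with _ | p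
      · rw [hl] at hok; simp at hok
      · rw [hl] at hok
        have hp0 : p ≠ "" := by
          obtain ⟨e, he, _, h1⟩ := lookP_mem hl
          exact h1 ▸ (hpar e he).1
        obtain ⟨g', rfl⟩ : ∃ g', g = g' + 1 := ⟨g - 1, by omega⟩
        show (if x = "" then 0 else _) = _
        rw [if_neg hx0, get?_nodes hnd, hl]
        show 1 + pvSizeA (pvNodes es) g' p = _
        rw [ih p hp0 hok g' (by omega)]
        simp only [pvDp, if_neg hx, hl]
        push_cast
        ring

theorem dd_child {es : List (String × String)} (hg : pvGood es)
    {e : String × String} (he : e ∈ es) : pvDD es e.2 = pvDD es e.1 + 1 := by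
  obtain ⟨hnd, hcom, _, hok⟩ := hg
  have h2 : e.2 ∈ es.map (fun e => e.2) := List.mem_map.mpr ⟨e, he, rfl⟩
  have hne : e.2 ≠ "COM" := fun hc => hcom (hc ▸ h2)
  have hl : pvLookP es e.2 = some e.1 := lookP_of_mem hnd he
  have haok := hok e.2 h2
  obtain ⟨n, hn⟩ : ∃ n, es.length + 1 = n + 1 := ⟨es.length, rfl⟩
  have haok' : pvAOk es n e.1 = true := by
    rw [hn] at haok
    simp only [pvAOk, Bool.or_eq_true, beq_iff_eq, hl] at haok
    rcases haok with h | h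
    · exact absurd h hne
    · exact h
  unfold pvDD
  rw [hn]
  show (if e.2 = "COM" then 0 else _) = _
  rw [if_neg hne, hl]
  rw [dp_stable n e.1 haok' (n + 1) (by omega)]

theorem dd_com (es : List (String × String)) : pvDD es "COM" = 0 := by
  unfold pvDD; exact dp_com es _

theorem dd_pos {es : List (String × String)} (hg : pvGood es)
    {c : String} (hc : c ∈ es.map (fun e => e.2)) : pvDD es c ≠ 0 := by
  obtain ⟨e, he, h2⟩ := List.mem_map.mp hc
  rw [← h2, dd_child hg he]
  omega

theorem values_nodes {es : List (String × String)} (hnd : (es.map (fun e => e.2)).Nodup)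
    (hcom : "COM" ∉ es.map (fun e => e.2)) :
    (pvNodes es).values = "" :: es.map (fun e => e.1) := by
  show (pvNodes es).items.map (fun p => p.2) = _
  rw [items_nodes hnd hcom]
  simp

theorem size_nodes {es : List (String × String)} (hnd : (es.map (fun e => e.2)).Nodup)
    (hcom : "COM" ∉ es.map (fun e => e.2)) :
    (pvNodes es).size = es.length + 1 := by
  show (pvNodes es).items.length = _
  rw [items_nodes hnd hcom]
  simp

def pvATotal (es : List (String × String)) : Int :=
  (pvNodes es).values.foldl
    (fun total v => total + pvSizeA (pvNodes es) ((pvNodes es).size + 1) v) 0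

def pvBTotal (es : List (String × String)) : Int :=
  pvBfs (pvChildren es) (es.length + 2) ["COM"] 0 0

theorem a_total {es : List (String × String)} (hg : pvGood es) :
    pvATotal es = ((es.map (fun e => (pvDD es e.2 : Int)))).sum := by
  obtain ⟨hnd, hcom, hpar, hok⟩ := hg
  unfold pvATotal
  rw [values_nodes hnd hcom, size_nodes hnd hcom]
  rw [PySem.List.foldl_add _ (fun v => pvSizeA (pvNodes es) (es.length + 1 + 1) v) 0]
  rw [List.map_cons, List.map_map]
  rw [List.sum_cons, sz_zero]
  have hmap : es.map ((fun v => pvSizeA (pvNodes es) (es.length + 1 + 1) v) ∘ fun e => e.1) =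
      es.map (fun e => (pvDD es e.2 : Int)) := by
    apply List.map_congr_left
    intro e he
    have haok : pvAOk es (es.length + 1) e.1 = true := by
      rcases (hpar e he).2 with h | h
      · rw [h]; exact aok_com es _
      · exact hok e.1 h
    show pvSizeA (pvNodes es) (es.length + 1 + 1) e.1 = _
    rw [sz_eq ⟨hnd, hcom, hpar, hok⟩ (es.length + 1) e.1 (hpar e he).1 haok _ (by omega)]
    rw [dd_child ⟨hnd, hcom, hpar, hok⟩ he]
    unfold pvDD
    push_cast
    ring
  rw [hmap]
  ring

theorem children_getD (es : List (String × String)) (n : String) :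
    (pvChildren es).getD n [] = pvChildL es n := by
  unfold pvChildren pvChildL
  rw [PySem.Dict.getD_foldl_modify_append]
  rfl

theorem childL_subset {es : List (String × String)} {n a : String}
    (h : a ∈ pvChildL es n) : a ∈ es.map (fun e => e.2) := by
  unfold pvChildL at h
  obtain ⟨e, he, h2⟩ := List.mem_map.mp h
  exact List.mem_map.mpr ⟨e, List.mem_of_mem_filter he, h2⟩

theorem count_childL {es : List (String × String)} (hnd : (es.map (fun e => e.2)).Nodup)
    (n a : String) :
    (pvChildL es n).count a =
      match es.find? (fun e => e.2 == a) with
      | some e => if e.1 = n then 1 else 0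
      | none => 0 := by
  induction es with
  | nil => simp [pvChildL]
  | cons e es ih =>
    simp only [List.map_cons, List.nodup_cons] at hnd
    by_cases hea : e.2 = a
    · rw [List.find?_cons_of_pos (by simpa using hea)]
      have htail : (pvChildL es n).count a = 0 := by
        apply List.count_eq_zero_of_not_mem
        intro hmem
        exact hnd.1 (hea ▸ childL_subset hmem)
      by_cases hen : e.1 = n
      · simp only [pvChildL, List.filter_cons, if_pos (by simpa using hen : (e.1 == n) = true)]
        rw [List.map_cons, hea, List.count_cons_self]
        rw [show ((es.filter (fun e => e.1 == n)).map (fun e => e.2)) = pvChildL es n from rfl]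
        rw [htail, if_pos hen]
      · simp only [pvChildL, List.filter_cons]
        rw [if_neg (by simpa using hen : ¬ (e.1 == n) = true)]
        rw [show ((es.filter (fun e => e.1 == n)).map (fun e => e.2)) = pvChildL es n from rfl]
        rw [htail, if_neg hen]
    · rw [List.find?_cons_of_neg (by simpa using hea)]
      have hstep : (pvChildL (e :: es) n).count a = (pvChildL es n).count a := by
        simp only [pvChildL, List.filter_cons]
        by_cases hen : (e.1 == n) = true
        · rw [if_pos hen, List.map_cons]
          simp [List.count_cons]
          exact hea
        · rw [if_neg hen]
      rw [hstep, ih hnd.2]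

theorem allN_nodup {es : List (String × String)} (hg : pvGood es) : (pvAllN es).Nodup := by
  obtain ⟨hnd, hcom, _, _⟩ := hg
  exact List.nodup_cons.mpr ⟨hcom, hnd⟩

theorem lv_nodup {es : List (String × String)} (hg : pvGood es) (k : Nat) :
    (pvLv es k).Nodup := (allN_nodup hg).filter _

theorem parent_mem_allN {es : List (String × String)} (hg : pvGood es)
    {e : String × String} (he : e ∈ es) : e.1 ∈ pvAllN es := by
  rcases (hg.2.2.1 e he).2 with h | h
  · rw [h]; exact List.mem_cons_self
  · exact List.mem_cons_of_mem _ h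

theorem perm_step {es : List (String × String)} (hg : pvGood es) (k : Nat) :
    ((pvLv es k).flatMap (pvChildL es)).Perm (pvLv es (k + 1)) := by
  rw [List.perm_iff_count]
  intro a
  rw [List.count_flatMap]
  rcases hf : es.find? (fun e => e.2 == a) with _ | e
  · -- a is nobody's child: both sides are 0
    have h1 : ((pvLv es k).map (List.count a ∘ pvChildL es)).sum = 0 := by
      apply List.sum_eq_zero
      intro x hx
      obtain ⟨m, hm, hmx⟩ := List.mem_map.mp hx
      rw [← hmx]
      show (pvChildL es m).count a = 0
      rw [count_childL hg.1, hf]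
    have h2 : a ∉ pvLv es (k + 1) := by
      intro hmem
      have ha : a ∈ pvAllN es := List.mem_of_mem_filter hmem
      have hdd : pvDD es a = k + 1 := by
        have := List.of_mem_filter hmem
        simpa using this
      rcases List.mem_cons.mp ha with rfl | ha
      · rw [dd_com] at hdd; omega
      · obtain ⟨e, he, h2⟩ := List.mem_map.mp ha
        have := List.find?_eq_none.mp hf e he
        simp [h2] at this
    rw [h1, List.count_eq_zero_of_not_mem h2]
  · -- e is a's unique defining edge (e.2 = a)
    have he : e ∈ es := List.mem_of_find?_eq_some hf
    have hea : e.2 = a := by simpa using List.find?_some hf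
    have hsum : ((pvLv es k).map (List.count a ∘ pvChildL es)).sum =
        ((pvLv es k).map (fun n => if e.1 = n then 1 else 0)).sum := by
      apply congrArg
      apply List.map_congr_left
      intro m _
      show (pvChildL es m).count a = _
      rw [count_childL hg.1, hf]
    rw [hsum]
    have hcount : ((pvLv es k).map (fun n => if e.1 = n then 1 else 0)).sum =
        (pvLv es k).count e.1 := by
      rw [List.count_eq_countP]
      induction pvLv es k with
      | nil => rfl
      | cons m L ihL =>
        rw [List.map_cons, List.sum_cons, ihL, List.countP_cons]
        by_cases h : e.1 = m
        · simp [h]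
          omega
        · simp [h, Ne.symm h]
    rw [hcount]
    have hmem_iff : e.1 ∈ pvLv es k ↔ a ∈ pvLv es (k + 1) := by
      unfold pvLv
      constructor
      · intro h
        have hdd : pvDD es e.1 = k := by simpa using List.of_mem_filter h
        apply List.mem_filter.mpr
        refine ⟨?_, by simp [← hea, dd_child hg he, hdd]⟩
        exact List.mem_cons_of_mem _ (List.mem_map.mpr ⟨e, he, hea⟩)
      · intro h
        have hdd : pvDD es a = k + 1 := by simpa using List.of_mem_filter h
        apply List.mem_filter.mpr
        refine ⟨parent_mem_allN hg he, ?_⟩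
        have := dd_child hg he
        rw [hea, hdd] at this
        simp
        omega
    by_cases hm : e.1 ∈ pvLv es k
    · rw [List.count_eq_one_of_mem (lv_nodup hg k) hm,
        List.count_eq_one_of_mem (lv_nodup hg (k + 1)) (hmem_iff.mp hm)]
    · rw [List.count_eq_zero_of_not_mem hm,
        List.count_eq_zero_of_not_mem (fun hc => hm (hmem_iff.mpr hc))]

theorem exists_dd_lt {es : List (String × String)} (hg : pvGood es) :
    ∀ m j, j ≤ m → (∃ c ∈ pvAllN es, pvDD es c = m) → ∃ c ∈ pvAllN es, pvDD es c = j := by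
  intro m
  induction m with
  | zero =>
    intro j hj h
    obtain rfl : j = 0 := by omega
    exact h
  | succ m ihm =>
    intro j hj h
    rcases Nat.eq_or_lt_of_le hj with rfl | hlt
    · exact h
    · obtain ⟨c, hc, hdd⟩ := h
      have hcn : c ∈ es.map (fun e => e.2) := by
        rcases List.mem_cons.mp hc with rfl | h
        · rw [dd_com] at hdd; omega
        · exact h
      obtain ⟨e, he, h2⟩ := List.mem_map.mp hcn
      have : pvDD es e.1 = m := by
        have := dd_child hg he
        rw [h2, hdd] at this
        omega
      exact ihm j (by omega) ⟨e.1, parent_mem_allN hg he, this⟩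

theorem sum_split (es : List (String × String)) (k : Nat) : ∀ (l : List String),
    ((l.filter (fun c => decide (k ≤ pvDD es c))).map (fun c => (pvDD es c : Int))).sum =
      (k : Int) * ((l.filter (fun c => pvDD es c == k)).length : Int) +
        ((l.filter (fun c => decide (k + 1 ≤ pvDD es c))).map (fun c => (pvDD es c : Int))).sum := by
  intro l
  induction l with
  | nil => simp
  | cons c l ih =>
    simp only [List.filter_cons]
    rcases Nat.lt_trichotomy (pvDD es c) k with h | h | h
    · rw [if_neg (by simpa using by omega), if_neg (by simpa using by omega),
        if_neg (by simpa using by omega)]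
      exact ih
    · rw [if_pos (by simpa using by omega), if_pos (by simpa using by omega),
        if_neg (by simpa using by omega)]
      rw [List.map_cons, List.sum_cons, List.length_cons, ih, h]
      push_cast
      ring
    · rw [if_pos (by simpa using by omega), if_neg (by simpa using by omega),
        if_pos (by simpa using by omega)]
      rw [List.map_cons, List.sum_cons, List.map_cons, List.sum_cons, ih]
      ring

theorem bfs_inv {es : List (String × String)} (hg : pvGood es) :
    ∀ fuel k level total, level.Perm (pvLv es k) → es.length + 2 - k ≤ fuel →
      pvBfs (pvChildren es) fuel level total (k : Int) =
        total + (((pvAllN es).filter (fun c => decide (k ≤ pvDD es c))).map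
          (fun c => (pvDD es c : Int))).sum := by
  intro fuel
  induction fuel with
  | zero =>
    intro k level total hperm hfuel
    have hfil : (pvAllN es).filter (fun c => decide (k ≤ pvDD es c)) = [] := by
      rw [List.filter_eq_nil_iff]
      intro c hc
      simp only [decide_eq_true_eq]
      have hle : pvDD es c ≤ es.length + 1 := dp_le es _ c
      omega
    rw [hfil]
    simp [pvBfs]
  | succ f ih =>
    intro k level total hperm hfuel
    by_cases hl : level.isEmpty
    · have hnil : level = [] := List.isEmpty_iff.mp hl
      subst hnil
      have hlv : pvLv es k = [] := hperm.symm.eq_nil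
      have hfil : (pvAllN es).filter (fun c => decide (k ≤ pvDD es c)) = [] := by
        rw [List.filter_eq_nil_iff]
        intro c hc hkc
        simp only [decide_eq_true_eq] at hkc
        obtain ⟨c', hc', hk⟩ := exists_dd_lt hg (pvDD es c) k hkc ⟨c, hc, rfl⟩
        have hmem : c' ∈ pvLv es k := List.mem_filter.mpr ⟨hc', by simp [hk]⟩
        rw [hlv] at hmem
        cases hmem
      rw [hfil]
      simp [pvBfs]
    · have hunf : pvBfs (pvChildren es) (f + 1) level total (k : Int) =
          pvBfs (pvChildren es) f (level.flatMap (fun n => (pvChildren es).getD n []))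
            (total + (k : Int) * (level.length : Int)) ((k : Int) + 1) := by
        show (if level.isEmpty then total else _) = _
        rw [if_neg (by simpa using hl)]
      rw [hunf]
      simp only [children_getD]
      have hcast : (k : Int) + 1 = ((k + 1 : Nat) : Int) := by push_cast; ring
      rw [hcast]
      have hperm' : (level.flatMap (pvChildL es)).Perm (pvLv es (k + 1)) :=
        (List.Perm.flatMap hperm (fun a _ => List.Perm.refl _)).trans (perm_step hg k)
      rw [ih (k + 1) _ _ hperm' (by omega)]
      rw [sum_split es k (pvAllN es)]
      have hlen : level.length = (pvLv es k).length := hperm.length_eq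
      rw [hlen]
      rw [show (pvAllN es).filter (fun c => pvDD es c == k) = pvLv es k from rfl]
      ring

theorem b_total {es : List (String × String)} (hg : pvGood es) :
    pvBTotal es = ((es.map (fun e => (pvDD es e.2 : Int)))).sum := by
  unfold pvBTotal
  have hlv0 : pvLv es 0 = ["COM"] := by
    unfold pvLv pvAllN
    rw [List.filter_cons]
    rw [if_pos (by simp [dd_com])]
    rw [List.filter_eq_nil_iff.mpr]
    intro c hc
    simp only [beq_iff_eq]
    exact dd_pos hg hc
  rw [show (0 : Int) = ((0 : Nat) : Int) from rfl]
  rw [bfs_inv hg (es.length + 2) 0 ["COM"] ((0 : Nat) : Int) (hlv0 ▸ List.Perm.refl _) (by omega)]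
  have hfil : (pvAllN es).filter (fun c => decide (0 ≤ pvDD es c)) = pvAllN es := by
    rw [List.filter_eq_self]
    intro c _
    simp
  rw [hfil]
  unfold pvAllN
  rw [List.map_cons, List.sum_cons, dd_com, List.map_map]
  simp [Function.comp_def]

theorem values_zero :
    ∀ (es : List (String × String)) (d : PySem.Dict String String),
      (∀ v ∈ d.values, v = "") → (∀ e ∈ es, e.1 = "") →
      ∀ v ∈ (es.foldl (fun d e => d.insert e.2 e.1) d).values, v = "" := by
  intro es
  induction es with
  | nil => intro d hd _ v hv; exact hd v hv
  | cons e es ih =>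
    intro d hd hz v hv
    rw [List.foldl_cons] at hv
    refine ih (d.insert e.2 e.1) ?_ (fun e' he' => hz e' (List.mem_cons_of_mem _ he')) v hv
    intro w hw
    rcases PySem.Dict.mem_values_insert d e.2 e.1 w hw with rfl | hw'
    · exact hz e List.mem_cons_self
    · exact hd w hw'

theorem a_zero {es : List (String × String)} (hz : pvZero es) : pvATotal es = 0 := by
  unfold pvATotal
  have hval : ∀ v ∈ (pvNodes es).values, v = "" := by
    apply values_zero es _ _ hz
    intro v hv
    rw [show (PySem.Dict.ofList [("COM", "")] : PySem.Dict String String) =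
      PySem.Dict.mk [("COM", "")] from rfl, PySem.Dict.values_mk] at hv
    simpa using hv
  rw [PySem.List.foldl_add _ (fun v => pvSizeA (pvNodes es) ((pvNodes es).size + 1) v) 0]
  rw [List.sum_eq_zero, add_zero]
  intro x hx
  obtain ⟨v, hv, hvx⟩ := List.mem_map.mp hx
  rw [← hvx, hval v hv, sz_zero]

theorem childL_com_zero {es : List (String × String)} (hz : pvZero es) :
    pvChildL es "COM" = [] := by
  unfold pvChildL
  rw [List.filter_eq_nil_iff.mpr, List.map_nil]
  intro e he
  simp [hz e he]

theorem b_zero {es : List (String × String)} (hz : pvZero es) : pvBTotal es = 0 := by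
  unfold pvBTotal
  obtain ⟨f, hf⟩ : ∃ f, es.length + 2 = f + 2 := ⟨es.length, rfl⟩
  rw [hf]
  show (if ([("COM" : String)]).isEmpty then (0 : Int) else _) = 0
  rw [if_neg (by simp)]
  simp only [children_getD]
  rw [show (["COM"].flatMap fun n => pvChildL es n) = [] by simp [childL_com_zero hz]]
  norm_num
  show (if (List.nil (α := String)).isEmpty then (0 : Int) else _) = 0
  rw [if_pos (by simp)]

theorem parse_of_splitsOk :
    ∀ lines : List String,
      lines.all (fun line => ((PySem.Str.split? line ")").getD []).length == 2) = true →
      pvParse lines = some (lines.map (fun line =>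
        match (PySem.Str.split? line ")").getD [] with
        | p :: n :: _ => (p, n)
        | _ => ("", ""))) := by
  intro lines
  induction lines with
  | nil => intro _; rfl
  | cons line rest ih =>
    intro h
    rw [List.all_cons, Bool.and_eq_true] at h
    rcases hsp : PySem.Str.split? line ")" with _ | parts
    · rw [hsp] at h; simp at h
    · rw [hsp] at h
      simp only [Option.getD_some, beq_iff_eq] at h
      obtain ⟨p, n, hpn⟩ : ∃ p n, parts = [p, n] := by
        rcases parts with _ | ⟨p, _ | ⟨n, _ | _⟩⟩ <;> simp at h ⊢
      subst hpn
      show (match PySem.Str.split? line ")" with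
        | some [p, n] => (pvParse rest).map (fun es => (p, n) :: es)
        | _ => none) = _
      rw [hsp, ih h.2, List.map_cons, hsp]
      rfl

theorem pre_good {s : String} (h : pvPreB s = true) :
    ∃ es, pvParse (PySem.Str.splitlines s) = some es ∧ (pvGood es ∨ pvZero es) := by
  unfold pvPreB at h
  rw [Bool.and_eq_true] at h
  obtain ⟨hsp, h⟩ := h
  refine ⟨pvEdges s, by rw [parse_of_splitsOk _ hsp]; rfl, ?_⟩
  simp only [Bool.or_eq_true, Bool.and_eq_true, decide_eq_true_eq, Bool.not_eq_true',
    List.all_eq_true, beq_iff_eq, bne_iff_ne, List.contains_eq_mem,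
    decide_eq_false_iff_not] at h
  rcases h with ⟨⟨⟨hnd, hcom⟩, hpar⟩, hok⟩ | hz
  · exact Or.inl ⟨hnd, hcom, hpar, hok⟩
  · exact Or.inr hz

-- ===== VERDICT (by name: the statement is the Claim_ definition above) =====
theorem compute_memoized_spec : Claim_equal_compute_memoized := by
  intro s _ hpre
  unfold Spec_compute_memoized
  have h : pvPreB s = true := hpre
  obtain ⟨es, hp, hg⟩ := pre_good h
  unfold compute_memoized compute_memoized_alt
  rw [hp]
  show pvATotal es = pvBTotal es
  rcases hg with hg | hz
  · rw [a_total hg, b_total hg]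
  · rw [a_zero hz, b_zero hz]
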